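-- pv_equiv track=rewrite | github.com/Israt-1234/PYTHON | problem/Hackerrank/Set/No idea.py | solve
-- ===== SOURCE A (Python) =====
-- def solve(n, m, my_array, set_a, set_b):
--     happiness = 0
--     set_a = set(set_a)
--     set_b = set(set_b)
--     for i in my_array:
--         if i in set_a:
--             happiness += 1
--         elif i in set_b:
--             happiness -= 1
--     return happiness
-- ===== SOURCE B (Python) =====
-- def solve(n, m, my_array, set_a, set_b):
--     counts = {}
--     for x in my_array:
--         counts[x] = counts.get(x, 0) + 1
--     sa = set(set_a)
--     sb_only = set(set_b) - sa
--     plus = sum(counts.get(v, 0) for v in sa)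
--     minus = sum(counts.get(v, 0) for v in sb_only)
--     return plus - minus
-- ===== Notes on version B (the rewrite author's own statement) =====
-- stated objective: alternative
-- what changed: B never branches over my_array: it tallies my_array into a count dict once, then sums those counts over set_a and over the set difference set_b - set_a and returns the difference of the two sums (the set difference replaces A's elif priority).
import Mathlib
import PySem

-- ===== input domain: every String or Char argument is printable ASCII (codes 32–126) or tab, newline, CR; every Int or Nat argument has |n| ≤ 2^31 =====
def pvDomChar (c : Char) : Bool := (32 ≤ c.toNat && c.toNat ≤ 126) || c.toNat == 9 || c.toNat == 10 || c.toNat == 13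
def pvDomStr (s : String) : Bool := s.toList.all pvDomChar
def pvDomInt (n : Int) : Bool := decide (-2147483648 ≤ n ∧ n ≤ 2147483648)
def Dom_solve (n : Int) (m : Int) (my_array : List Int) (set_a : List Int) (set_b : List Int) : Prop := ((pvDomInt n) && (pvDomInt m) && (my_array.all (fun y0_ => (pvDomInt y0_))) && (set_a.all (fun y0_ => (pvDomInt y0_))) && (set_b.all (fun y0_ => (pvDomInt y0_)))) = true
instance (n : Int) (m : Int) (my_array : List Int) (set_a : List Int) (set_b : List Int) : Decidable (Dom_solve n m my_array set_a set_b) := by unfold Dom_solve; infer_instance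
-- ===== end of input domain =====

-- B iterates over the SETS instead of the array: it tallies my_array into a count dict
-- and returns (sum of counts over set_a) - (sum of counts over set_b - set_a);
-- an alternative decomposition, same asymptotic cost.


-- ===== PORT A =====
def solve (n : Int) (m : Int) (my_array : List Int) (set_a : List Int) (set_b : List Int) : Int :=
  let sa : PySem.Set Int := PySem.Set.ofList set_a
  let sb : PySem.Set Int := PySem.Set.ofList set_b
  my_array.foldl (fun happiness i =>
    if PySem.Set.contains sa i then happiness + 1
    else if PySem.Set.contains sb i then happiness - 1
    else happiness) 0

-- ===== PORT B =====
def solve_alt (n : Int) (m : Int) (my_array : List Int) (set_a : List Int) (set_b : List Int) : Int :=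
  let counts : PySem.Dict Int Int :=
    my_array.foldl (fun d x => d.insert x (d.getD x 0 + 1)) PySem.Dict.empty
  let sa : PySem.Set Int := PySem.Set.ofList set_a
  let sb_only : PySem.Set Int := PySem.Set.diff (PySem.Set.ofList set_b) sa
  let plus : Int := (sa.map (fun v => counts.getD v 0)).sum
  let minus : Int := (sb_only.map (fun v => counts.getD v 0)).sum
  plus - minus

-- ===== PRECONDITION & SPEC =====
def Spec_solve (n : Int) (m : Int) (my_array : List Int) (set_a : List Int) (set_b : List Int) (out : Int) : Prop := out = solve_alt n m my_array set_a set_b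
instance (n : Int) (m : Int) (my_array : List Int) (set_a : List Int) (set_b : List Int) (out : Int) : Decidable (Spec_solve n m my_array set_a set_b out) := by unfold Spec_solve; infer_instance

-- ===== CLAIM (what is proved, stated in full; the proofs are below) =====
def Claim_equal_solve : Prop := ∀ (n : Int) (m : Int) (my_array : List Int) (set_a : List Int) (set_b : List Int), Dom_solve n m my_array set_a set_b → Spec_solve n m my_array set_a set_b (solve n m my_array set_a set_b)

-- ===== LEMMAS AND PROOFS =====

-- per-element contribution of A's loop
def pvF (sa sb : PySem.Set Int) (i : Int) : Int :=
  if PySem.Set.contains sa i then 1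
  else if PySem.Set.contains sb i then -1
  else 0

theorem pv_sum_map_add (g h : Int → Int) (l : List Int) :
    (l.map (fun k => g k + h k)).sum = (l.map g).sum + (l.map h).sum := by
  induction l with
  | nil => simp
  | cons a l ihl =>
    simp only [List.map_cons, List.sum_cons, ihl]
    ring

-- indicator sum over a nodup list
theorem pv_sum_indicator (x : Int) (l : List Int) (hnd : l.Nodup) :
    (l.map (fun k => if k = x then (1:Int) else 0)).sum = if x ∈ l then 1 else 0 := by
  induction l with
  | nil => simp
  | cons a l ih =>
    rcases List.nodup_cons.mp hnd with ⟨ha, hndl⟩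
    simp only [List.map_cons, List.sum_cons]
    rw [ih hndl]
    by_cases hax : a = x
    · subst hax
      simp [ha]
    · have hxa : ¬ x = a := fun h => hax h.symm
      simp [hax, hxa]

-- sum of xs-counts over a nodup list = number of elements of xs that lie in l
theorem pv_count_sum (xs l : List Int) (hnd : l.Nodup) :
    (l.map (fun k => (xs.count k : Int))).sum
      = (xs.map (fun x => if x ∈ l then (1:Int) else 0)).sum := by
  induction xs with
  | nil => simp
  | cons x xs ih =>
    have hsplit : (l.map (fun k => (((x :: xs).count k : Nat) : Int)))
        = (l.map (fun k => ((xs.count k : Nat) : Int) + (if k = x then (1:Int) else 0))) := by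
      apply List.map_congr_left
      intro k _
      rw [List.count_cons]
      by_cases h : k = x
      · simp [h]
      · have hxk : ¬ x = k := fun hh => h hh.symm
        simp [h, hxk]
    rw [hsplit, pv_sum_map_add, ih, pv_sum_indicator x l hnd]
    simp [add_comm]

theorem pv_foldl_A (sa sb : PySem.Set Int) (xs : List Int) (a : Int) :
    xs.foldl (fun happiness i =>
      if PySem.Set.contains sa i then happiness + 1
      else if PySem.Set.contains sb i then happiness - 1
      else happiness) a = a + (xs.map (pvF sa sb)).sum := by
  have h : (fun happiness i =>
      if PySem.Set.contains sa i then happiness + 1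
      else if PySem.Set.contains sb i then happiness - 1
      else happiness) = (fun (acc : Int) (i : Int) => acc + pvF sa sb i) := by
    funext acc i
    unfold pvF
    split_ifs <;> ring
  rw [h, PySem.List.foldl_add]

theorem pv_sum_map_sub (g h : Int → Int) (l : List Int) :
    (l.map (fun k => g k - h k)).sum = (l.map g).sum - (l.map h).sum := by
  induction l with
  | nil => simp
  | cons a l ihl =>
    simp only [List.map_cons, List.sum_cons, ihl]
    ring

-- A's per-element contribution, written with B's two membership indicators
theorem pv_pointwise (set_a set_b : List Int) (x : Int) :
    pvF (PySem.Set.ofList set_a) (PySem.Set.ofList set_b) x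
      = (if x ∈ PySem.Set.ofList set_a then (1:Int) else 0)
        - (if x ∈ PySem.Set.diff (PySem.Set.ofList set_b) (PySem.Set.ofList set_a) then (1:Int) else 0) := by
  by_cases hA : x ∈ set_a
  · simp [pvF, PySem.Set.contains, PySem.Set.mem_ofList, PySem.Set.diff, hA]
  · by_cases hB : x ∈ set_b
    · simp [pvF, PySem.Set.contains, PySem.Set.mem_ofList, PySem.Set.diff, List.mem_filter, hA, hB]
    · simp [pvF, PySem.Set.contains, PySem.Set.mem_ofList, PySem.Set.diff, List.mem_filter, hA, hB]

-- ===== VERDICT (by name: the statement is the Claim_ definition above) =====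
theorem solve_spec : Claim_equal_solve := by
  intro n m my_array set_a set_b _
  unfold Spec_solve solve solve_alt
  rw [PySem.Dict.foldl_insert_getD_add_one_eq_counter, pv_foldl_A]
  simp only [PySem.Dict.getD_counter]
  have hnd2 : (PySem.Set.diff (PySem.Set.ofList set_b) (PySem.Set.ofList set_a)).Nodup :=
    (PySem.Set.nodup_ofList set_b).filter _
  rw [pv_count_sum my_array _ (PySem.Set.nodup_ofList set_a),
      pv_count_sum my_array _ hnd2,
      zero_add, ← pv_sum_map_sub]
  apply congrArg List.sum
  apply List.map_congr_left
  intro x _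
  exact pv_pointwise set_a set_b x
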